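-- pv_equiv track=rewrite | github.com/jonhuth/dsa | algorithms/arrays/max_improvement.py | max_improvement
-- ===== SOURCE A (Python) =====
-- def max_improvement(students, scores):
--     '''
--     given list of students and scores, return the max improvement between 2
--     scores for any given student.
--     notes:
--     lower score must be before higher score
--     must be non-negative improvement
--     there can be multiple students
--     time: O(n) | space: O(n) where n = len of students arr
--     '''
--     maxDiff = 0
--     m = {}  # student: minScore
--     for i, student in enumerate(students):
--         if student not in m:
--             m[student] = scores[i]
--         else:
--             m[student] = min(m[student], scores[i])
--         maxDiff = max(maxDiff, scores[i] - m[student])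
--
--     return maxDiff
-- ===== SOURCE B (Python) =====
-- def max_improvement(students, scores):
--     # group each student's scores in order, then sweep each group with a running minimum
--     groups = {}
--     for i, student in enumerate(students):
--         groups.setdefault(student, []).append(scores[i])
--     best = 0
--     for vals in groups.values():
--         lo = vals[0]
--         for v in vals:
--             lo = min(lo, v)
--             best = max(best, v - lo)
--     return best
-- ===== Notes on version B (the rewrite author's own statement) =====
-- stated objective: alternative
-- what changed: A's single interleaved scan keeping a running per-student minimum and global maxDiff is replaced by two phases: first group each student's scores into a dict of ordered lists, then sweep each group with a running minimum taking the overall maximum starting at 0.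
import Mathlib
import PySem

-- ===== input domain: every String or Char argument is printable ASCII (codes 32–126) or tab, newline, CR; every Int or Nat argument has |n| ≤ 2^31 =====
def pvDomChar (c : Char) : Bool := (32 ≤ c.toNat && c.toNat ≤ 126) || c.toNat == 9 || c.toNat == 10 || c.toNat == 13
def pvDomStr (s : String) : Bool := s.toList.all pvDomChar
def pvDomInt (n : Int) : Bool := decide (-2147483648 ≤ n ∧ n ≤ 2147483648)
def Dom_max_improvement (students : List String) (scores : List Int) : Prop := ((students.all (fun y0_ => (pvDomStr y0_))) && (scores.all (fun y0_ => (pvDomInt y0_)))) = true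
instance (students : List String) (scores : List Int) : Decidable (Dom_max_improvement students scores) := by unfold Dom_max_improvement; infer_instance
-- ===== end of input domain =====

-- B replaces A's single interleaved scan by grouping each student's scores into a dict of lists
-- and then sweeping each group with a running minimum (objective: alternative decomposition).

-- ===== PORT A =====
def max_improvement (students : List String) (scores : List Int) : Int :=
  ((PySem.List.enumerate students).foldl
    (fun st p =>
      let v := PySem.List.pyGetD scores p.1 0   -- scores[i]; total form, exact under Pre_
      let m := if st.2.contains p.2 = false
               then st.2.insert p.2 v
               else st.2.insert p.2 (min (st.2.getD p.2 0) v)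
      (max st.1 (v - m.getD p.2 0), m))
    ((0 : Int), (PySem.Dict.empty : PySem.Dict String Int))).1

-- ===== PORT B =====
def max_improvement_alt (students : List String) (scores : List Int) : Int :=
  let groups : PySem.Dict String (List Int) :=
    (PySem.List.enumerate students).foldl
      (fun d p => d.insert p.2 (d.getD p.2 [] ++ [PySem.List.pyGetD scores p.1 0]))
      PySem.Dict.empty
  groups.values.foldl
    (fun best vals =>
      (vals.foldl (fun st v => let lo := min st.1 v; (lo, max st.2 (v - lo)))
        (PySem.List.pyGetD vals 0 0, best)).2)   -- vals[0]: every group is nonempty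
    0

-- ===== PRECONDITION & SPEC =====
-- Pre_ excludes exactly the inputs where the Python raises IndexError (both A and B index scores[i]
-- for every i below len(students)).
def Pre_max_improvement (students : List String) (scores : List Int) : Prop :=
  students.length ≤ scores.length
instance (students : List String) (scores : List Int) : Decidable (Pre_max_improvement students scores) := by unfold Pre_max_improvement; infer_instance

def pvWitness_max_improvement : List String × List Int := (["a", "b", "a"], [5, 7, 9])

def Spec_max_improvement (students : List String) (scores : List Int) (out : Int) : Prop := out = max_improvement_alt students scores
instance (students : List String) (scores : List Int) (out : Int) : Decidable (Spec_max_improvement students scores out) := by unfold Spec_max_improvement; infer_instance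

-- ===== CLAIM (what is proved, stated in full; the proofs are below) =====
def Claim_equal_max_improvement : Prop := ∀ (students : List String) (scores : List Int), Dom_max_improvement students scores → Pre_max_improvement students scores → Spec_max_improvement students scores (max_improvement students scores)

-- ===== LEMMAS AND PROOFS =====

-- the interleaved pairs (student, score) both loops actually consume
def pvPairs (students : List String) (scores : List Int) : List (String × Int) :=
  (PySem.List.enumerate students).map (fun p => (p.2, PySem.List.pyGetD scores p.1 0))

-- the scores of student s, in order
def pvGrp (l : List (String × Int)) (s : String) : List Int :=
  (l.filter (fun p => p.1 == s)).map (·.2)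

def pvMinOf (vs : List Int) : Int := vs.foldl min (vs.getD 0 0)

-- A's loop body on a (student, score) pair
def pvStepA (st : Int × PySem.Dict String Int) (q : String × Int) : Int × PySem.Dict String Int :=
  let v := q.2
  let m := if st.2.contains q.1 = false
           then st.2.insert q.1 v
           else st.2.insert q.1 (min (st.2.getD q.1 0) v)
  (max st.1 (v - m.getD q.1 0), m)

def pvRunA (l : List (String × Int)) : Int × PySem.Dict String Int :=
  l.foldl pvStepA (0, PySem.Dict.empty)

-- B's grouping dict, inner sweep step, and whole second phase, on the pair list
def pvGroups (l : List (String × Int)) : PySem.Dict String (List Int) :=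
  l.foldl (fun d q => d.modify q.1 [] (· ++ [q.2])) PySem.Dict.empty

def pvSweep (st : Int × Int) (v : Int) : Int × Int :=
  let lo := min st.1 v; (lo, max st.2 (v - lo))

def pvRunB (l : List (String × Int)) : Int :=
  (pvGroups l).values.foldl
    (fun best vals => (vals.foldl pvSweep (PySem.List.pyGetD vals 0 0, best)).2) 0

-- best improvement of one group, started from 0
def pvBestOf (vs : List Int) : Int := (vs.foldl pvSweep (vs.getD 0 0, 0)).2

-- running maximum of f over a list of keys
def pvFMax (K : List String) (f : String → Int) (a : Int) : Int :=
  K.foldl (fun b k => max b (f k)) a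

def pvBVal (l : List (String × Int)) : Int :=
  pvFMax (PySem.Set.ofList (l.map (·.1))) (fun k => pvBestOf (pvGrp l k)) 0

lemma pvSweep_fst (vs : List Int) (l0 b : Int) :
    (vs.foldl pvSweep (l0, b)).1 = vs.foldl min l0 := by
  induction vs generalizing l0 b with
  | nil => rfl
  | cons v t ih => simpa [pvSweep] using ih (min l0 v) _

lemma pvSweep_max (vs : List Int) (l0 b c : Int) :
    (vs.foldl pvSweep (l0, max b c)).2 = max b (vs.foldl pvSweep (l0, c)).2 := by
  induction vs generalizing l0 c with
  | nil => rfl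
  | cons v t ih =>
      simp only [List.foldl_cons, pvSweep, max_assoc]
      exact ih (min l0 v) _

lemma pvSweep_pull (vs : List Int) (b : Int) (h : vs ≠ []) :
    (vs.foldl pvSweep (vs.getD 0 0, b)).2 = max b (pvBestOf vs) := by
  cases vs with
  | nil => exact absurd rfl h
  | cons a t =>
      have h1 : pvSweep (a, b) a = (a, max b 0) := by simp [pvSweep]
      have h2 : pvSweep (a, 0) a = (a, max 0 0) := by simp [pvSweep]
      simp only [pvBestOf, List.getD, List.foldl_cons, List.getElem?_cons_zero,
        Option.getD_some, h1, h2]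
      simpa using pvSweep_max t a b 0

lemma pvMinOf_append (vs : List Int) (v : Int) (h : vs ≠ []) :
    pvMinOf (vs ++ [v]) = min (pvMinOf vs) v := by
  cases vs with
  | nil => exact absurd rfl h
  | cons a t => simp [pvMinOf, List.foldl_append]

lemma pvBestOf_append (vs : List Int) (v : Int) (h : vs ≠ []) :
    pvBestOf (vs ++ [v]) = max (pvBestOf vs) (v - min (pvMinOf vs) v) := by
  cases vs with
  | nil => exact absurd rfl h
  | cons a t =>
      have hstart : pvSweep (a, 0) a = (a, 0) := by simp [pvSweep]
      show ((a :: (t ++ [v])).foldl pvSweep (a, 0)).2 = _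
      rw [List.foldl_cons, hstart, List.foldl_append]
      show max (t.foldl pvSweep (a, 0)).2 (v - min (t.foldl pvSweep (a, 0)).1 v) =
        max ((a :: t).foldl pvSweep (a, 0)).2 (v - min (pvMinOf (a :: t)) v)
      rw [List.foldl_cons, hstart, pvSweep_fst]
      simp [pvMinOf, List.getD]

lemma pvBestOf_single (v : Int) : pvBestOf [v] = 0 := by
  simp [pvBestOf, pvSweep]

lemma pvFMax_max (K : List String) (f : String → Int) (a e : Int) :
    pvFMax K f (max a e) = max (pvFMax K f a) e := by
  induction K generalizing a with
  | nil => rfl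
  | cons k t ih =>
      simp only [pvFMax, List.foldl_cons] at *
      rw [show max (max a e) (f k) = max (max a (f k)) e by omega]
      exact ih _

lemma pvFMax_congr (K : List String) (f g : String → Int) (a : Int)
    (h : ∀ k ∈ K, f k = g k) : pvFMax K f a = pvFMax K g a :=
  PySem.List.foldl_congr_mem K _ _ a (fun _ x hx => by rw [h x hx])

lemma pvFMax_update (K : List String) (f f' : String → Int) (s : String) (e : Int)
    (hs : s ∈ K) (hnd : K.Nodup) (hne : ∀ k, k ≠ s → f' k = f k)
    (hfs : f' s = max (f s) e) :
    ∀ a, pvFMax K f' a = max (pvFMax K f a) e := by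
  induction K with
  | nil => cases hs
  | cons k t ih =>
      intro a
      have hnd' := hnd.of_cons
      by_cases hks : k = s
      · subst hks
        have hnot : k ∉ t := (List.nodup_cons.1 hnd).1
        simp only [pvFMax, List.foldl_cons, hfs]
        have hcongr : pvFMax t f' (max (max a (f k)) e) = pvFMax t f (max (max a (f k)) e) :=
          pvFMax_congr _ _ _ _ (fun j hj => hne j (fun hjk => hnot (hjk ▸ hj)))
        rw [show max a (max (f k) e) = max (max a (f k)) e by omega]
        calc pvFMax t f' (max (max a (f k)) e)
            = pvFMax t f (max (max a (f k)) e) := hcongr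
          _ = max (pvFMax t f (max a (f k))) e := pvFMax_max ..
      · have hst : s ∈ t := by
          rcases List.mem_cons.1 hs with h | h
          · exact absurd h.symm hks
          · exact h
        have hk : f' k = f k := hne k hks
        simp only [pvFMax, List.foldl_cons, hk]
        exact ih hst hnd' _

lemma pvGrp_append (l : List (String × Int)) (q : String × Int) (s : String) :
    pvGrp (l ++ [q]) s = pvGrp l s ++ (if q.1 == s then [q.2] else []) := by
  simp only [pvGrp, List.filter_append]
  split <;> simp_all

lemma pvGrp_nil_iff (l : List (String × Int)) (s : String) :
    pvGrp l s = [] ↔ s ∉ l.map (·.1) := by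
  simp only [pvGrp, List.map_eq_nil_iff, List.filter_eq_nil_iff, List.mem_map]
  constructor
  · rintro h ⟨p, hp, rfl⟩; exact absurd (by simp) (h p hp)
  · intro h p hp hps
    exact h ⟨p, hp, by simpa using hps⟩

-- A's dict maps each seen student to the minimum of its group, and A's running maxDiff
-- equals B's value; both simultaneously by induction from the right.
lemma pvMain (l : List (String × Int)) :
    (∀ s, (pvRunA l).2.get? s =
      (if pvGrp l s = [] then none else some (pvMinOf (pvGrp l s)))) ∧
    (pvRunA l).1 = pvBVal l := by
  induction l using List.reverseRecOn with
  | nil =>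
      refine ⟨fun s => by simp [pvRunA, pvGrp, PySem.Dict.get?_empty], ?_⟩
      simp [pvRunA, pvBVal, pvFMax, PySem.Set.ofList_nil]
  | append_singleton l q ih =>
      obtain ⟨hd, hv⟩ := ih
      obtain ⟨s, v⟩ := q
      have hrun : pvRunA (l ++ [(s, v)]) = pvStepA (pvRunA l) (s, v) := by
        simp [pvRunA, List.foldl_append]
      set K : List String := PySem.Set.ofList (l.map (·.1)) with hK
      have hndK : K.Nodup := PySem.Set.nodup_ofList _
      have hKmem : ∀ k, k ∈ K ↔ k ∈ l.map (·.1) := fun k => PySem.Set.mem_ofList _ _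
      have hK' : PySem.Set.ofList ((l ++ [(s, v)]).map (·.1)) = PySem.Set.add K s := by
        rw [List.map_append]
        simpa using PySem.Set.ofList_append_singleton (l.map (·.1)) s
      have hgrp_ne : ∀ k, k ≠ s → pvGrp (l ++ [(s, v)]) k = pvGrp l k := by
        intro k hk
        rw [pvGrp_append]
        simp [Ne.symm hk]
      have hgrp_s : pvGrp (l ++ [(s, v)]) s = pvGrp l s ++ [v] := by
        rw [pvGrp_append]; simp
      by_cases hmem : s ∈ l.map (·.1)
      · -- s already seen: dict has the min of its (nonempty) group
        have hne : pvGrp l s ≠ [] := fun h => ((pvGrp_nil_iff l s).1 h) hmem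
        have hget : (pvRunA l).2.get? s = some (pvMinOf (pvGrp l s)) := by
          rw [hd s, if_neg hne]
        have hcont : (pvRunA l).2.contains s = true := by
          rw [PySem.Dict.contains_eq_isSome_get?, hget]; rfl
        have hstep : pvStepA (pvRunA l) (s, v) =
            (max (pvRunA l).1 (v - min (pvMinOf (pvGrp l s)) v),
             (pvRunA l).2.insert s (min (pvMinOf (pvGrp l s)) v)) := by
          simp [pvStepA, hcont, PySem.Dict.getD_eq_get?_getD, hget]
        refine ⟨?_, ?_⟩
        · intro t
          rw [hrun, hstep]
          rcases eq_or_ne t s with rfl | hts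
          · rw [PySem.Dict.get?_insert_self, hgrp_s,
              if_neg (by simp), pvMinOf_append _ _ hne]
          · rw [PySem.Dict.get?_insert_of_ne _ _ hts, hd t, hgrp_ne t hts]
        · rw [hrun, hstep]
          simp only [hv, pvBVal, hK', PySem.Set.add_of_mem ((hKmem s).2 hmem), ← hK]
          rw [pvFMax_update K (fun k => pvBestOf (pvGrp l k))
                (fun k => pvBestOf (pvGrp (l ++ [(s, v)]) k)) s
                (v - min (pvMinOf (pvGrp l s)) v)
                ((hKmem s).2 hmem) hndK
                (fun k hk => by
                  show pvBestOf (pvGrp (l ++ [(s, v)]) k) = pvBestOf (pvGrp l k)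
                  rw [hgrp_ne k hk])
                (by
                  show pvBestOf (pvGrp (l ++ [(s, v)]) s) =
                    max (pvBestOf (pvGrp l s)) (v - min (pvMinOf (pvGrp l s)) v)
                  rw [hgrp_s, pvBestOf_append _ _ hne]) 0]
      · -- s is new: no dict entry yet, its group was empty
        have hnil : pvGrp l s = [] := (pvGrp_nil_iff l s).2 hmem
        have hget : (pvRunA l).2.get? s = none := by rw [hd s, if_pos hnil]
        have hcont : (pvRunA l).2.contains s = false := by
          rw [PySem.Dict.contains_eq_isSome_get?, hget]; rfl
        have hstep : pvStepA (pvRunA l) (s, v) =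
            (max (pvRunA l).1 0, (pvRunA l).2.insert s v) := by
          simp [pvStepA, hcont, PySem.Dict.getD_insert_self]
        refine ⟨?_, ?_⟩
        · intro t
          rw [hrun, hstep]
          rcases eq_or_ne t s with rfl | hts
          · rw [PySem.Dict.get?_insert_self, hgrp_s, hnil]
            simp [pvMinOf]
          · rw [PySem.Dict.get?_insert_of_ne _ _ hts, hd t, hgrp_ne t hts]
        · rw [hrun, hstep]
          simp only [hv, pvBVal, hK', ← hK,
            PySem.Set.add_of_not_mem (fun h => hmem ((hKmem s).1 h))]
          have hfold : pvFMax (K ++ [s]) (fun k => pvBestOf (pvGrp (l ++ [(s, v)]) k)) 0 =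
              max (pvFMax K (fun k => pvBestOf (pvGrp (l ++ [(s, v)]) k)) 0)
                  (pvBestOf (pvGrp (l ++ [(s, v)]) s)) := by
            simp [pvFMax, List.foldl_append]
          rw [hfold, hgrp_s, hnil]
          simp only [List.nil_append, pvBestOf_single]
          congr 1
          exact (pvFMax_congr _ _ _ _ (fun k hk => by
            show pvBestOf (pvGrp l k) = pvBestOf (pvGrp (l ++ [(s, v)]) k)
            rcases eq_or_ne k s with rfl | hks
            · exact absurd ((hKmem k).1 hk) hmem
            · rw [hgrp_ne k hks]))

-- Port A computes pvRunA on the pair list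
lemma pvA_eq (students : List String) (scores : List Int) :
    max_improvement students scores = (pvRunA (pvPairs students scores)).1 := by
  unfold max_improvement pvRunA pvPairs pvStepA
  rw [List.foldl_map]

-- Port B computes pvRunB on the pair list
lemma pvB_eq (students : List String) (scores : List Int) :
    max_improvement_alt students scores = pvRunB (pvPairs students scores) := by
  simp only [max_improvement_alt, pvRunB, pvGroups, pvPairs,
    List.foldl_map, PySem.Dict.modify]
  rfl

-- B's second phase is the running maximum of per-group bests over the distinct students
lemma pvRunB_eq (l : List (String × Int)) : pvRunB l = pvBVal l := by
  unfold pvRunB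
  have hkeys : (pvGroups l).keys = PySem.Set.ofList (l.map (·.1)) := by
    rw [pvGroups, PySem.Dict.keys_foldl_modify_key]
    simp [PySem.Set.update_nil_left]
  have hnd : (pvGroups l).keys.Nodup := by
    rw [hkeys]; exact PySem.Set.nodup_ofList _
  have hgetD : ∀ c, (pvGroups l).getD c [] = pvGrp l c := by
    intro c
    rw [pvGroups, PySem.Dict.getD_foldl_modify_append]
    simp [pvGrp]
  rw [PySem.Dict.values_eq_map_keys (pvGroups l) hnd [], hkeys, List.foldl_map]
  have hne : ∀ k ∈ PySem.Set.ofList (l.map (·.1)), pvGrp l k ≠ [] := by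
    intro k hk h
    exact ((pvGrp_nil_iff l k).1 h) ((PySem.Set.mem_ofList _ _).1 hk)
  rw [PySem.List.foldl_congr_mem (PySem.Set.ofList (l.map (·.1))) _
      (fun b k => max b (pvBestOf (pvGrp l k))) 0
      (fun acc k hk => by
        rw [hgetD k, PySem.List.pyGetD_zero]
        exact pvSweep_pull _ _ (hne k hk))]
  rfl

-- ===== VERDICT (by name: the statement is the Claim_ definition above) =====
theorem max_improvement_spec : Claim_equal_max_improvement := by
  intro students scores _ _
  unfold Spec_max_improvement
  rw [pvA_eq, pvB_eq, pvRunB_eq]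
  exact (pvMain _).2
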